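-- pv_equiv track=rewrite | github.com/DeepBlueDynamics/nemesis8 | MCP/agentmail.py | _extract_key_from_text
-- ===== SOURCE A (Python) =====
-- from typing import Any, Dict, List, Optional, Tuple
--
-- def _extract_key_from_text(text: str) -> Optional[str]:
--     raw = (text or "").strip()
--     if not raw:
--         return None
--
--     prefixes = [
--         "AGENTMAIL_API_KEY=",
--         "AGENTMAIL_KEY=",
--         "agentmail_api_key=",
--         "agentmail_key=",
--         "api_key=",
--         "key=",
--     ]
--     for prefix in prefixes:
--         if prefix in raw:
--             value = raw.split(prefix, 1)[1].strip().strip('"').strip("'")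
--             if value:
--                 return value
--
--     tokens: List[str] = []
--     cur: List[str] = []
--     for ch in raw:
--         if ch.isalnum() or ch in {"-", "_"}:
--             cur.append(ch)
--         else:
--             if cur:
--                 tokens.append("".join(cur))
--                 cur = []
--     if cur:
--         tokens.append("".join(cur))
--
--     candidates = [t for t in tokens if 20 <= len(t) <= 160]
--     if not candidates:
--         return None
--
--     preferred = [t for t in candidates if t.lower().startswith("am_")]
--     if preferred:
--         preferred.sort(key=len, reverse=True)
--         return preferred[0]
--
--     candidates.sort(key=len, reverse=True)
--     return candidates[0]
-- ===== SOURCE B (Python) =====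
-- from typing import List, Optional
--
-- _PREFIXES = [
--     "AGENTMAIL_API_KEY=",
--     "AGENTMAIL_KEY=",
--     "agentmail_api_key=",
--     "agentmail_key=",
--     "api_key=",
--     "key=",
-- ]
--
--
-- def _extract_key_from_text(text: str) -> Optional[str]:
--     raw = (text or "").strip()
--     if not raw:
--         return None
--
--     for prefix in _PREFIXES:
--         if prefix in raw:
--             value = raw.split(prefix, 1)[1].strip().strip('"').strip("'")
--             if value:
--                 return value
--
--     # One streaming pass: tokenize and keep running "longest" bests
--     # (strict > so equal-length ties keep the earliest token, like a stable sort).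
--     best_preferred: Optional[str] = None
--     best_general: Optional[str] = None
--     cur: List[str] = []
--
--     def close(bp: Optional[str], bg: Optional[str], cur: List[str]):
--         if cur:
--             tok = "".join(cur)
--             if 20 <= len(tok) <= 160:
--                 if bg is None or len(tok) > len(bg):
--                     bg = tok
--                 if tok.lower().startswith("am_"):
--                     if bp is None or len(tok) > len(bp):
--                         bp = tok
--         return bp, bg
--
--     for ch in raw:
--         if ch.isalnum() or ch in {"-", "_"}:
--             cur.append(ch)
--         else:
--             best_preferred, best_general = close(best_preferred, best_general, cur)
--             cur = []
--     best_preferred, best_general = close(best_preferred, best_general, cur)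
--
--     return best_preferred if best_preferred is not None else best_general
-- ===== Notes on version B (the rewrite author's own statement) =====
-- stated objective: alternative
-- what changed: The build-tokens / filter / filter / two stable reverse sorts pipeline is replaced by a single streaming tokenizer pass that keeps two running longest-so-far bests (preferred am_ token and general token) with strict-> updates, so no intermediate token/candidate lists and no sorts are built; the prefix early-return scan is kept.
import Mathlib
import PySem

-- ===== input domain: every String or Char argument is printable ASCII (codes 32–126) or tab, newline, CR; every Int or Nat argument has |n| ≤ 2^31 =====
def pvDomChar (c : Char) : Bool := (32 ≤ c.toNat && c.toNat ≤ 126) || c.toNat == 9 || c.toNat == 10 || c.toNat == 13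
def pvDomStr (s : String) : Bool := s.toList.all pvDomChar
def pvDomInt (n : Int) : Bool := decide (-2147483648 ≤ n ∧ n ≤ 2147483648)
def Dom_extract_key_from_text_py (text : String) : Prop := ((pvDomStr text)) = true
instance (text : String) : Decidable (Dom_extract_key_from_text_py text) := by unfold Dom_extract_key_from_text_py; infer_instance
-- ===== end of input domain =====

-- B replaces A's build-tokens / filter / filter / stable-sort pipeline by one streaming
-- tokenizer pass keeping two running "longest so far" bests (strict >, so ties keep the
-- earliest token, matching the stable reverse sort); the prefix scan is kept. Return value only.

-- shared literal pieces of both Pythons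
def pvPrefixes : List String :=
  ["AGENTMAIL_API_KEY=", "AGENTMAIL_KEY=", "agentmail_api_key=", "agentmail_key=", "api_key=", "key="]
-- the literal test '20 <= len(t) <= 160' (both sources contain it verbatim)
def pvInLen (t : String) : Bool := decide (20 ≤ PySem.Str.len t ∧ PySem.Str.len t ≤ 160)
-- the literal test "t.lower().startswith('am_')"
def pvPref (t : String) : Bool := PySem.Str.startswith (PySem.Str.lower t) "am_"

-- ===== PORT A =====
-- the 'for prefix in prefixes' loop with its early return
def pvAScan : List String → String → Option String
  | [], _ => none
  | p :: ps, raw =>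
    if PySem.Str.isIn p raw then
      -- raw.split(prefix, 1)[1]: index 1 always exists when the prefix occurs, so getD is a harmless totaliser
      let value := PySem.Str.stripChars (PySem.Str.stripChars
        (PySem.Str.strip (((PySem.Str.splitMax? raw p 1).getD []).getD 1 "")) "\"") "'"
      if value ≠ "" then some value else pvAScan ps raw
    else pvAScan ps raw

-- the tokenizer loop body: state = (tokens, cur)
def pvAStep (st : List String × List Char) (ch : Char) : List String × List Char :=
  if PySem.Chars.isalnum ch || ch == '-' || ch == '_' then
    (st.1, st.2 ++ [ch])
  else if st.2 ≠ [] then (st.1 ++ [String.ofList st.2], []) else (st.1, [])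

def extract_key_from_text_py (text : String) : Option String :=
  let raw := PySem.Str.strip text
  if raw = "" then none
  else
    match pvAScan pvPrefixes raw with
    | some v => some v
    | none =>
      let st := raw.toList.foldl pvAStep ([], [])
      let tokens := if st.2 ≠ [] then st.1 ++ [String.ofList st.2] else st.1
      let candidates := tokens.filter pvInLen
      if candidates = [] then none
      else
        let preferred := candidates.filter pvPref
        if preferred ≠ [] then
          PySem.List.pyGet? (PySem.List.sorted preferred PySem.Str.len true) 0
        else
          PySem.List.pyGet? (PySem.List.sorted candidates PySem.Str.len true) 0

-- ===== PORT B =====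
def pvBScan : List String → String → Option String
  | [], _ => none
  | p :: ps, raw =>
    if PySem.Str.isIn p raw then
      let value := PySem.Str.stripChars (PySem.Str.stripChars
        (PySem.Str.strip (((PySem.Str.splitMax? raw p 1).getD []).getD 1 ""))  "\"") "'"
      if value ≠ "" then some value else pvBScan ps raw
    else pvBScan ps raw

-- 'if bg is None or len(tok) > len(bg): bg = tok'
def pvUpd (b : Option String) (tok : String) : Option String :=
  match b with
  | none => some tok
  | some m => if PySem.Str.len m < PySem.Str.len tok then some tok else some m

-- the 'close' helper of Source B
def pvClose (bp bg : Option String) (cur : List Char) : Option String × Option String :=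
  if cur ≠ [] then
    let tok := String.ofList cur
    if pvInLen tok then
      (if pvPref tok then pvUpd bp tok else bp, pvUpd bg tok)
    else (bp, bg)
  else (bp, bg)

-- streaming loop body: state = (best_preferred, best_general, cur)
def pvBStep (st : Option String × Option String × List Char) (ch : Char) :
    Option String × Option String × List Char :=
  if PySem.Chars.isalnum ch || ch == '-' || ch == '_' then
    (st.1, st.2.1, st.2.2 ++ [ch])
  else
    let c := pvClose st.1 st.2.1 st.2.2
    (c.1, c.2, [])

def extract_key_from_text_py_alt (text : String) : Option String :=
  let raw := PySem.Str.strip text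
  if raw = "" then none
  else
    match pvBScan pvPrefixes raw with
    | some v => some v
    | none =>
      let st := raw.toList.foldl pvBStep (none, none, [])
      let fin := pvClose st.1 st.2.1 st.2.2
      match fin.1 with
      | some v => some v
      | none => fin.2

-- ===== PRECONDITION & SPEC =====
def Spec_extract_key_from_text_py (text : String) (out : Option String) : Prop := out = extract_key_from_text_py_alt text
instance (text : String) (out : Option String) : Decidable (Spec_extract_key_from_text_py text out) := by unfold Spec_extract_key_from_text_py; infer_instance

-- ===== CLAIM (what is proved, stated in full; the proofs are below) =====
def Claim_equal_extract_key_from_text_py : Prop := ∀ (text : String), Dom_extract_key_from_text_py text → Spec_extract_key_from_text_py text (extract_key_from_text_py text)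

-- ===== LEMMAS AND PROOFS =====

-- the two prefix scans are the same loop
theorem scan_eq (ps : List String) (raw : String) : pvBScan ps raw = pvAScan ps raw := by
  induction ps with
  | nil => rfl
  | cons p ps ih => simp only [pvAScan, pvBScan, ih]

-- A's tokenizer only appends to the token list
theorem afold_append (l : List Char) (toks : List String) (cur : List Char) :
    l.foldl pvAStep (toks, cur)
      = (toks ++ (l.foldl pvAStep ([], cur)).1, (l.foldl pvAStep ([], cur)).2) := by
  induction l generalizing toks cur with
  | nil => simp
  | cons c l ih =>
    simp only [List.foldl_cons, pvAStep]
    split_ifs with h hcur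
    · exact ih toks (cur ++ [c])
    · simp only [List.nil_append]
      rw [ih [String.ofList cur], ih (toks ++ [String.ofList cur])]
      simp
    · exact ih toks []

-- the per-token update steps B performs
def pvStepP (b : Option String) (t : String) : Option String :=
  if pvInLen t && pvPref t then pvUpd b t else b
def pvStepG (b : Option String) (t : String) : Option String :=
  if pvInLen t then pvUpd b t else b

theorem close_eq (bp bg : Option String) (cur : List Char) (h : cur ≠ []) :
    pvClose bp bg cur = (pvStepP bp (String.ofList cur), pvStepG bg (String.ofList cur)) := by
  simp only [pvClose, pvStepP, pvStepG]
  rw [if_pos h]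
  by_cases hl : pvInLen (String.ofList cur) = true
  · simp [hl]
  · simp [hl]

theorem close_nil (bp bg : Option String) : pvClose bp bg [] = (bp, bg) := by
  simp [pvClose]

-- B's streaming state tracks the running bests over A's token list
theorem bfold_eq (l : List Char) (bp bg : Option String) (cur : List Char) :
    l.foldl pvBStep (bp, bg, cur)
      = ((l.foldl pvAStep ([], cur)).1.foldl pvStepP bp,
         (l.foldl pvAStep ([], cur)).1.foldl pvStepG bg,
         (l.foldl pvAStep ([], cur)).2) := by
  induction l generalizing bp bg cur with
  | nil => simp
  | cons c l ih =>
    simp only [List.foldl_cons, pvBStep, pvAStep]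
    split_ifs with h hcur
    · exact ih bp bg (cur ++ [c])
    · rw [ih, close_eq _ _ _ hcur]
      simp only [List.nil_append]
      rw [afold_append l [String.ofList cur]]
      simp
    · rw [not_not] at hcur
      subst hcur
      rw [close_nil]
      exact ih bp bg []

-- a foldl of conditional updates is max? of the filtered list
theorem foldP_eq_max (T : List String) :
    T.foldl pvStepP none = PySem.List.max? (T.filter (fun t => pvInLen t && pvPref t)) PySem.Str.len := by
  rw [PySem.List.max?, List.foldl_filter]
  congr 1
  funext b t
  cases b <;> simp [pvStepP, pvUpd]

theorem foldG_eq_max (T : List String) :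
    T.foldl pvStepG none = PySem.List.max? (T.filter pvInLen) PySem.Str.len := by
  rw [PySem.List.max?, List.foldl_filter]
  congr 1
  funext b t
  cases b <;> simp [pvStepG, pvUpd]

-- head of a stable reverse sort by key = first element of maximal key (= max?)
theorem head_foldl_insertBy {α : Type} (key : α → Int) (xs : List α) (acc : List α) :
    (xs.foldl (fun a x => PySem.List.insertBy (fun a b => decide (key b < key a)) x a) acc).head?
      = xs.foldl (fun o x =>
          match o with
          | none => some x
          | some m => if key m < key x then some x else some m) acc.head? := by
  induction xs generalizing acc with
  | nil => rfl
  | cons x xs ih =>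
    simp only [List.foldl_cons]
    rw [ih]
    congr 1
    cases acc with
    | nil => rfl
    | cons y ys =>
      simp only [PySem.List.insertBy, List.head?_cons]
      by_cases h : (key y < key x)
      · simp [h]
      · simp [h]

theorem head_sorted_rev (xs : List String) :
    (PySem.List.sorted xs PySem.Str.len true).head? = PySem.List.max? xs PySem.Str.len := by
  rw [PySem.List.sorted_rev_eq_foldl_insertBy, PySem.List.max?]
  exact head_foldl_insertBy PySem.Str.len xs []

theorem pyGet?_zero {α : Type} (xs : List α) : PySem.List.pyGet? xs 0 = xs.head? := by
  rw [List.head?_eq_getElem?]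
  have := PySem.List.pyGet?_natCast xs 0
  simpa using this

theorem filterPP (T : List String) :
    (T.filter pvInLen).filter pvPref = T.filter (fun t => pvInLen t && pvPref t) := by
  rw [List.filter_filter]
  exact List.filter_congr (fun x _ => Bool.and_comm _ _)

-- the tail of both ports: A's filter/sort/head pipeline equals B's running bests, per token list
theorem final_case (T : List String) :
    (if T.filter pvInLen = [] then (none : Option String)
     else if (T.filter pvInLen).filter pvPref ≠ [] then
        PySem.List.pyGet? (PySem.List.sorted ((T.filter pvInLen).filter pvPref) PySem.Str.len true) 0
     else PySem.List.pyGet? (PySem.List.sorted (T.filter pvInLen) PySem.Str.len true) 0)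
    = (match T.foldl pvStepP none with
       | some v => some v
       | none => T.foldl pvStepG none) := by
  rw [foldP_eq_max, foldG_eq_max, ← filterPP]
  by_cases hC : T.filter pvInLen = []
  · have hP : (T.filter pvInLen).filter pvPref = [] := by rw [hC]; rfl
    rw [if_pos hC, hP]
    rw [hC]
    rfl
  · rw [if_neg hC]
    by_cases hP : (T.filter pvInLen).filter pvPref = []
    · rw [if_neg (by simpa using hP), hP, pyGet?_zero, head_sorted_rev]
      rfl
    · rw [if_pos (by simpa using hP), pyGet?_zero, head_sorted_rev]
      cases hm : PySem.List.max? ((T.filter pvInLen).filter pvPref) PySem.Str.len with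
      | none => exact absurd ((PySem.List.max?_eq_none_iff _ _).mp hm) hP
      | some v => rfl

-- ===== VERDICT (by name: the statement is the Claim_ definition above) =====
theorem extract_key_from_text_py_spec : Claim_equal_extract_key_from_text_py := by
  intro text _
  unfold Spec_extract_key_from_text_py extract_key_from_text_py extract_key_from_text_py_alt
  by_cases h0 : PySem.Str.strip text = ""
  · simp [h0]
  · rw [if_neg h0, if_neg h0, scan_eq]
    cases hscan : pvAScan pvPrefixes (PySem.Str.strip text) with
    | some v => rfl
    | none =>
      simp only
      rw [bfold_eq]
      by_cases hc : ((PySem.Str.strip text).toList.foldl pvAStep ([], [])).2 ≠ []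
      · rw [if_pos hc, close_eq _ _ _ hc, final_case]
        dsimp only
        simp [List.foldl_append]
      · rw [if_neg hc]
        rw [not_not] at hc
        dsimp only
        rw [hc, close_nil, final_case]
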